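-- pv_equiv track=rewrite | github.com/SimranKodwani-2003/Weekly-Coding-Challenge-SabudhFoundation- | Week-2/Problem-2.py | app
-- ===== SOURCE A (Python) =====
-- def app(l):
--     n=[]
--     p=[]
--     for i in range(len(l)):
--         if l[i]<0:
--             n.append(l[i])
--         else:
--             p.append(l[i])
--     return n+p
-- ===== SOURCE B (Python) =====
-- def app(l):
--     # stable sort: negatives (key False) before non-negatives (key True), order preserved
--     return sorted(l, key=lambda x: not (x < 0))
-- ===== Notes on version B (the rewrite author's own statement) =====
-- stated objective: idiomatic
-- what changed: Replaced the manual two-accumulator partition loop with a single stable sort on the boolean key not (x < 0), which keeps negatives first and preserves relative order.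
import Mathlib
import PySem

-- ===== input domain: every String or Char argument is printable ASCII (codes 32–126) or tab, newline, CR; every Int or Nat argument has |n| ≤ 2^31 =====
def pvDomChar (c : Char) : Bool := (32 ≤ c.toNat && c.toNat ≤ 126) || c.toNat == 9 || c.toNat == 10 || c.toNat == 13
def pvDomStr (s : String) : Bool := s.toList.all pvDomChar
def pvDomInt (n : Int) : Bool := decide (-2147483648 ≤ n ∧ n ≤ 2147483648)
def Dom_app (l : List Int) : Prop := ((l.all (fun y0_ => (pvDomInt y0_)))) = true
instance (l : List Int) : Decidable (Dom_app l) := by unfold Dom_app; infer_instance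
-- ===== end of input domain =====

-- B replaces A's two-accumulator partition loop by one stable sort on the key not (x < 0) (idiomatic; not faster).

-- ===== PORT A =====
-- for i in range(len(l)): l[i] is always in range, so pyGetD with default 0 is exact here
def app (l : List Int) : List Int :=
  let np := (PySem.List.pyRange 0 (PySem.List.len l)).foldl
    (fun (np : List Int × List Int) i =>
      let x := PySem.List.pyGetD l i 0
      if x < 0 then (np.1 ++ [x], np.2) else (np.1, np.2 ++ [x]))
    ([], [])
  np.1 ++ np.2

-- ===== PORT B =====
def app_alt (l : List Int) : List Int :=
  PySem.List.sorted l (fun x => !decide (x < 0))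

-- ===== PRECONDITION & SPEC =====
def Spec_app (l : List Int) (out : List Int) : Prop := out = app_alt l
instance (l : List Int) (out : List Int) : Decidable (Spec_app l out) := by unfold Spec_app; infer_instance

-- ===== CLAIM (what is proved, stated in full; the proofs are below) =====
def Claim_equal_app : Prop := ∀ (l : List Int), Dom_app l → Spec_app l (app l)

-- ===== LEMMAS AND PROOFS =====

-- A's loop partitions: the accumulators end as n ++ negatives, p ++ non-negatives.
lemma app_loop (l : List Int) (n p : List Int) :
    l.foldl (fun (np : List Int × List Int) x =>
        if x < 0 then (np.1 ++ [x], np.2) else (np.1, np.2 ++ [x])) (n, p)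
      = (n ++ l.filter (fun x => decide (x < 0)), p ++ l.filter (fun x => !decide (x < 0))) := by
  induction l generalizing n p with
  | nil => simp
  | cons x t ih =>
    by_cases hx : x < 0 <;> simp [List.foldl_cons, hx, ih]

-- inserting a key-true element at the end
lemma insertBy_true (key : Int → Bool) (x : Int) (L : List Int) (hx : key x = true) :
    PySem.List.insertBy (fun a b => decide (key a < key b)) x L = L ++ [x] := by
  apply PySem.List.insertBy_of_forall_not_before
  intro y _
  simp [hx]

-- inserting a key-false element between the false block and the true block
lemma insertBy_false (key : Int → Bool) (x : Int) (A B : List Int) (hx : key x = false)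
    (hA : ∀ a ∈ A, key a = false) (hB : ∀ b ∈ B, key b = true) :
    PySem.List.insertBy (fun a b => decide (key a < key b)) x (A ++ B)
      = (A ++ [x]) ++ B := by
  induction A with
  | nil =>
    cases B with
    | nil => rfl
    | cons b t =>
      have hb : key b = true := hB b (by simp)
      simp [PySem.List.insertBy, hx, hb]
  | cons a t ih =>
    have ha : key a = false := hA a (by simp)
    have ih' := ih (fun a' h => hA a' (by simp [h]))
    simp [PySem.List.insertBy, hx, ha, ih']

-- the insertion-sort fold keeps the false/true blocks, appending stably
lemma sort_loop (key : Int → Bool) (l A B : List Int)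
    (hA : ∀ a ∈ A, key a = false) (hB : ∀ b ∈ B, key b = true) :
    l.foldl (fun acc x => PySem.List.insertBy (fun a b => decide (key a < key b)) x acc) (A ++ B)
      = (A ++ l.filter (fun x => key x = false)) ++ (B ++ l.filter (fun x => key x = true)) := by
  induction l generalizing A B with
  | nil => simp
  | cons x t ih =>
    cases hx : key x with
    | false =>
      have hA' : ∀ a ∈ A ++ [x], key a = false := by
        intro a ha
        rcases List.mem_append.mp ha with h | h
        · exact hA a h
        · simp at h; simpa [h]
      rw [List.foldl_cons, insertBy_false key x A B hx hA hB, ih (A ++ [x]) B hA' hB]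
      simp [hx, List.append_assoc]
    | true =>
      have hB' : ∀ b ∈ B ++ [x], key b = true := by
        intro b hb
        rcases List.mem_append.mp hb with h | h
        · exact hB b h
        · simp at h; simpa [h]
      rw [List.foldl_cons, insertBy_true key x (A ++ B) hx,
          show A ++ B ++ [x] = A ++ (B ++ [x]) by simp, ih A (B ++ [x]) hA hB']
      simp [hx, List.append_assoc]

-- ===== VERDICT (by name: the statement is the Claim_ definition above) =====
theorem app_spec : Claim_equal_app := by
  intro l _
  show app l = app_alt l
  simp only [app, app_alt]
  have hfold := PySem.List.foldl_pyRange_zero_pyGetD l 0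
    (fun (np : List Int × List Int) x =>
      if x < 0 then (np.1 ++ [x], np.2) else (np.1, np.2 ++ [x])) ([], [])
  simp only at hfold
  rw [hfold, app_loop, PySem.List.sorted_eq_foldl_insertBy]
  have := sort_loop (fun x => !decide (x < 0)) l [] []
    (by intro a h; simp at h) (by intro b h; simp at h)
  simp only [List.nil_append] at this
  rw [this]
  congr 1 <;> { apply List.filter_congr; intro x _; by_cases h : x < 0 <;> simp [h] }
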